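-- pv_equiv track=rewrite | github.com/Yuvraj2006py/bank-churn-prediction | src/data_preprocessing.py | sanitize_feature_names
-- ===== SOURCE A (Python) =====
-- from typing import Tuple, Optional, List, Dict, Any
--
-- def sanitize_feature_names(feature_names: List[str]) -> List[str]:
--     """
--     Sanitize feature names to be compatible with XGBoost and other ML libraries.
--
--     XGBoost doesn't allow feature names with: [, ], <, >
--
--     Parameters:
--     -----------
--     feature_names : list
--         List of feature names
--
--     Returns:
--     --------
--     list
--         List of sanitized feature names
--     """
--     sanitized = []
--     for name in feature_names:
--         # Replace invalid characters (XGBoost doesn't allow: [, ], <, >)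
--         sanitized_name = str(name).replace('[', '_lb_').replace(']', '_rb_')
--         sanitized_name = sanitized_name.replace('<', '_lt_').replace('>', '_gt_')
--         sanitized_name = sanitized_name.replace('+', '_plus_')
--         sanitized_name = sanitized_name.replace(' ', '_').replace('-', '_')
--         sanitized_name = sanitized_name.replace('(', '_').replace(')', '_')
--         sanitized_name = sanitized_name.replace('/', '_div_').replace('*', '_mul_')
--         sanitized.append(sanitized_name)
--     return sanitized
-- ===== SOURCE B (Python) =====
-- from typing import Tuple, Optional, List, Dict, Any
--
-- _TABLE = {'[': '_lb_', ']': '_rb_', '<': '_lt_', '>': '_gt_', '+': '_plus_',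
--           ' ': '_', '-': '_', '(': '_', ')': '_', '/': '_div_', '*': '_mul_'}
--
--
-- def sanitize_feature_names(feature_names: List[str]) -> List[str]:
--     return [''.join(_TABLE.get(c, c) for c in str(name)) for name in feature_names]
-- ===== Notes on version B (the rewrite author's own statement) =====
-- stated objective: idiomatic
-- what changed: Replaces the chain of eleven full-string .replace() passes with a fixed character-to-replacement translation table consulted in a single pass over each name's characters.
import Mathlib
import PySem

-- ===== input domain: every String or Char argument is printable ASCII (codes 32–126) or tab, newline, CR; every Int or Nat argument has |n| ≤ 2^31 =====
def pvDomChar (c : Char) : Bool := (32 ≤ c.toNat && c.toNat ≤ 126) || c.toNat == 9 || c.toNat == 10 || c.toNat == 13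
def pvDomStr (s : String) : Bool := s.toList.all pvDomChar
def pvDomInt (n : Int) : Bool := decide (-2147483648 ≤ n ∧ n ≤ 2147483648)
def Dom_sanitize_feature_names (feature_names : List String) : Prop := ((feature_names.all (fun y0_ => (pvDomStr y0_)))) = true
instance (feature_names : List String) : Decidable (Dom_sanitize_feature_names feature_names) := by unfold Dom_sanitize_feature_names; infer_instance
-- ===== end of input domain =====

-- B replaces A's chain of eleven full-string .replace() passes by one pass per name
-- consulting a fixed character→replacement table (idiomatic; same return value).


-- ===== PORT A =====
-- the per-name body of A's loop: the eleven chained str.replace calls, in A's order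
def pvSanitizeNameA (name : String) : String :=
  let s1 := PySem.Str.replace (PySem.Str.replace name "[" "_lb_") "]" "_rb_"
  let s2 := PySem.Str.replace (PySem.Str.replace s1 "<" "_lt_") ">" "_gt_"
  let s3 := PySem.Str.replace s2 "+" "_plus_"
  let s4 := PySem.Str.replace (PySem.Str.replace s3 " " "_") "-" "_"
  let s5 := PySem.Str.replace (PySem.Str.replace s4 "(" "_") ")" "_"
  PySem.Str.replace (PySem.Str.replace s5 "/" "_div_") "*" "_mul_"

def sanitize_feature_names (feature_names : List String) : List String :=
  feature_names.foldl (fun sanitized name => sanitized ++ [pvSanitizeNameA name]) []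

-- ===== PORT B =====
-- the module-level _TABLE dict of Source B
def pvTable : PySem.Dict Char String :=
  PySem.Dict.ofList [('[', "_lb_"), (']', "_rb_"), ('<', "_lt_"), ('>', "_gt_"),
                     ('+', "_plus_"), (' ', "_"), ('-', "_"), ('(', "_"), (')', "_"),
                     ('/', "_div_"), ('*', "_mul_")]

-- ''.join(_TABLE.get(c, c) for c in str(name))
def pvSanitizeNameB (name : String) : String :=
  PySem.Str.join "" (name.toList.map (fun c => pvTable.getD c (String.ofList [c])))

def sanitize_feature_names_alt (feature_names : List String) : List String :=
  feature_names.map pvSanitizeNameB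

-- ===== PRECONDITION & SPEC =====
def Spec_sanitize_feature_names (feature_names : List String) (out : List String) : Prop := out = sanitize_feature_names_alt feature_names
instance (feature_names : List String) (out : List String) : Decidable (Spec_sanitize_feature_names feature_names out) := by unfold Spec_sanitize_feature_names; infer_instance

-- ===== CLAIM (what is proved, stated in full; the proofs are below) =====
def Claim_equal_sanitize_feature_names : Prop := ∀ (feature_names : List String), Dom_sanitize_feature_names feature_names → Spec_sanitize_feature_names feature_names (sanitize_feature_names feature_names)

-- ===== LEMMAS AND PROOFS =====

-- single-character substitution performed by one str.replace pass
def pvSubst (o : Char) (new : List Char) (c : Char) : List Char :=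
  if c == o then new else [c]

-- B's per-character table lookup, on lists of chars
def pvCharSub (c : Char) : List Char := (pvTable.getD c (String.ofList [c])).toList

theorem pv_go_single (o : Char) (new : List Char) :
    ∀ (fuel : Nat) (l acc : List Char), l.length ≤ fuel →
      PySem.Chars.replace.go [o] new fuel l acc
        = acc.reverse ++ l.flatMap (pvSubst o new) := by
  intro fuel
  induction fuel with
  | zero =>
    intro l acc h
    have hl : l = [] := List.eq_nil_of_length_eq_zero (Nat.le_zero.mp h)
    subst hl
    rw [PySem.Chars.replace.go.eq_1]
    simp
  | succ fuel ih =>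
    intro l acc h
    cases l with
    | nil =>
      rw [PySem.Chars.replace.go.eq_2 _ _ _ _ (by omega)]
      simp
    | cons c t =>
      rw [PySem.Chars.replace.go.eq_3]
      by_cases hc : o = c
      · subst hc
        rw [if_pos (by simp [List.isPrefixOf])]
        have hd : List.drop [o].length (o :: t) = t := rfl
        rw [hd, ih t (new.reverse ++ acc) (by simpa using Nat.le_of_succ_le_succ h)]
        simp [pvSubst, List.flatMap_cons]
      · have h1 : (o == c) = false := beq_eq_false_iff_ne.mpr hc
        have h2 : (c == o) = false := beq_eq_false_iff_ne.mpr (Ne.symm hc)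
        rw [if_neg (by simp [List.isPrefixOf, h1])]
        rw [ih t (c :: acc) (by simpa using Nat.le_of_succ_le_succ h)]
        simp [pvSubst, h2, List.flatMap_cons]

theorem pv_replace_single (s : List Char) (o : Char) (new : List Char) :
    PySem.Chars.replace s [o] new = s.flatMap (pvSubst o new) := by
  unfold PySem.Chars.replace
  simp only [List.isEmpty_cons, Bool.false_eq_true, if_false]
  simpa using pv_go_single o new s.length s [] (le_refl _)

theorem pv_items : pvTable.items =
    [('[', "_lb_"), (']', "_rb_"), ('<', "_lt_"), ('>', "_gt_"),
     ('+', "_plus_"), (' ', "_"), ('-', "_"), ('(', "_"), (')', "_"),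
     ('/', "_div_"), ('*', "_mul_")] := by decide

-- composing the eleven per-character substitutions equals one table lookup
theorem pv_charSub_spec (c : Char) :
    List.flatMap (fun x1 =>
      List.flatMap (fun x2 =>
        List.flatMap (fun x3 =>
          List.flatMap (fun x4 =>
            List.flatMap (fun x5 =>
              List.flatMap (fun x6 =>
                List.flatMap (fun x7 =>
                  List.flatMap (fun x8 =>
                    List.flatMap (fun x9 =>
                      List.flatMap (pvSubst '*' "_mul_".toList)
                        (pvSubst '/' "_div_".toList x9))
                      (pvSubst ')' "_".toList x8))
                    (pvSubst '(' "_".toList x7))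
                  (pvSubst '-' "_".toList x6))
                (pvSubst ' ' "_".toList x5))
              (pvSubst '+' "_plus_".toList x4))
            (pvSubst '>' "_gt_".toList x3))
          (pvSubst '<' "_lt_".toList x2))
        (pvSubst ']' "_rb_".toList x1))
      (pvSubst '[' "_lb_".toList c) = pvCharSub c := by
  by_cases h1 : c = '['
  · subst h1; decide
  by_cases h2 : c = ']'
  · subst h2; decide
  by_cases h3 : c = '<'
  · subst h3; decide
  by_cases h4 : c = '>'
  · subst h4; decide
  by_cases h5 : c = '+'
  · subst h5; decide
  by_cases h6 : c = ' '
  · subst h6; decide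
  by_cases h7 : c = '-'
  · subst h7; decide
  by_cases h8 : c = '('
  · subst h8; decide
  by_cases h9 : c = ')'
  · subst h9; decide
  by_cases h10 : c = '/'
  · subst h10; decide
  by_cases h11 : c = '*'
  · subst h11; decide
  -- c is not a special character: every substitution keeps it, and the table misses
  have f1 : ('[' == c) = false := beq_eq_false_iff_ne.mpr (Ne.symm h1)
  have f2 : (']' == c) = false := beq_eq_false_iff_ne.mpr (Ne.symm h2)
  have f3 : ('<' == c) = false := beq_eq_false_iff_ne.mpr (Ne.symm h3)
  have f4 : ('>' == c) = false := beq_eq_false_iff_ne.mpr (Ne.symm h4)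
  have f5 : ('+' == c) = false := beq_eq_false_iff_ne.mpr (Ne.symm h5)
  have f6 : (' ' == c) = false := beq_eq_false_iff_ne.mpr (Ne.symm h6)
  have f7 : ('-' == c) = false := beq_eq_false_iff_ne.mpr (Ne.symm h7)
  have f8 : ('(' == c) = false := beq_eq_false_iff_ne.mpr (Ne.symm h8)
  have f9 : (')' == c) = false := beq_eq_false_iff_ne.mpr (Ne.symm h9)
  have f10 : ('/' == c) = false := beq_eq_false_iff_ne.mpr (Ne.symm h10)
  have f11 : ('*' == c) = false := beq_eq_false_iff_ne.mpr (Ne.symm h11)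
  simp [pvSubst, pvCharSub, PySem.Dict.getD, PySem.Dict.get?, pv_items,
        h1, h2, h3, h4, h5, h6, h7, h8, h9, h10, h11,
        f1, f2, f3, f4, f5, f6, f7, f8, f9, f10, f11]

theorem pv_intersperse_nil_flatten (l : List (List Char)) :
    (List.intersperse ([] : List Char) l).flatten = l.flatten := by
  induction l with
  | nil => rfl
  | cons a t ih =>
    cases t with
    | nil => rfl
    | cons b s => simpa [List.intersperse] using ih

theorem pv_nameA_eq_nameB (name : String) :
    pvSanitizeNameA name = pvSanitizeNameB name := by
  rw [← String.toList_inj]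
  have hB : (pvSanitizeNameB name).toList = name.toList.flatMap pvCharSub := by
    simp only [pvSanitizeNameB, PySem.Str.toList_join, PySem.Chars.join,
      List.intercalate]
    have hsep : ("" : String).toList = [] := rfl
    rw [hsep, pv_intersperse_nil_flatten, List.map_map]
    rfl
  rw [hB]
  have s1 : ("[" : String).toList = ['['] := rfl
  have s2 : ("]" : String).toList = [']'] := rfl
  have s3 : ("<" : String).toList = ['<'] := rfl
  have s4 : (">" : String).toList = ['>'] := rfl
  have s5 : ("+" : String).toList = ['+'] := rfl
  have s6 : (" " : String).toList = [' '] := rfl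
  have s7 : ("-" : String).toList = ['-'] := rfl
  have s8 : ("(" : String).toList = ['('] := rfl
  have s9 : (")" : String).toList = [')'] := rfl
  have s10 : ("/" : String).toList = ['/'] := rfl
  have s11 : ("*" : String).toList = ['*'] := rfl
  simp only [pvSanitizeNameA, PySem.Str.toList_replace,
    s1, s2, s3, s4, s5, s6, s7, s8, s9, s10, s11, pv_replace_single,
    List.flatMap_assoc]
  simp only [pv_charSub_spec]

theorem pv_foldl_append (l : List String) :
    ∀ acc : List String,
      l.foldl (fun sanitized name => sanitized ++ [pvSanitizeNameA name]) acc
        = acc ++ l.map pvSanitizeNameA := by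
  induction l with
  | nil => intro acc; simp
  | cons x xs ih => intro acc; simp [List.foldl_cons, ih, List.append_assoc]

-- ===== VERDICT (by name: the statement is the Claim_ definition above) =====
theorem sanitize_feature_names_spec : Claim_equal_sanitize_feature_names := by
  intro fns _
  unfold Spec_sanitize_feature_names sanitize_feature_names sanitize_feature_names_alt
  rw [pv_foldl_append, List.nil_append]
  exact List.map_congr_left (fun name _ => pv_nameA_eq_nameB name)
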